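-- pv_equiv track=rewrite | github.com/latikamehra/PythonProjects | CommonCodingProblems/ConnectAllNodes.py | constrGraph
-- ===== SOURCE A (Python) =====
-- def constrGraph(edges, nodes):
--     graph = {}
--
--     for node in nodes :
--         graph[node] = []
--         for e in edges :
--             if e[0] == node : graph[node].append(e[1])
--             if e[1] == node : graph[node].append(e[0])
--
--     return graph
-- ===== SOURCE B (Python) =====
-- def constrGraph(edges, nodes):
--     graph = {node: [] for node in nodes}
--     for e in edges:
--         u, v = e[0], e[1]
--         if u in graph:
--             graph[u].append(v)
--         if v in graph:
--             graph[v].append(u)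
--     return graph
-- ===== Notes on version B (the rewrite author's own statement) =====
-- stated objective: faster
-- what changed: Replaces the per-node scan of the whole edge list (O(nodes*edges)) by one dict-comprehension initialisation plus a single pass over the edges that appends each endpoint to the other's pre-initialized list when it is a known node.
-- outside the precondition, e.g. on constrGraph([[]], []): A returns {}, B raises IndexError
import Mathlib
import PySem

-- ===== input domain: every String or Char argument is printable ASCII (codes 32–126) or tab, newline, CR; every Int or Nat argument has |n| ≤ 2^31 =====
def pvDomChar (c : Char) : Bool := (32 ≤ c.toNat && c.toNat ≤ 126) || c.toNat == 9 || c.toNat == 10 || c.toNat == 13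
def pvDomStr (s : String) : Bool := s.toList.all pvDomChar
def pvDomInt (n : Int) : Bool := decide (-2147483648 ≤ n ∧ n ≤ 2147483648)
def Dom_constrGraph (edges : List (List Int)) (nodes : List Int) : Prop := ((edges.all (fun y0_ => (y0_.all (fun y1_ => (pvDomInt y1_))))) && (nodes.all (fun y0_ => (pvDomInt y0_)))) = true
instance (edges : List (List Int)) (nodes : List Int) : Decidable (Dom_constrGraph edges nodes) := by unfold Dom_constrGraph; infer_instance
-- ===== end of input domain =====

-- B replaces A's per-node scan of all edges by a single pass over the edges into pre-initialized per-node lists (asymptotically faster; equivalence is about the return value).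


-- ===== PORT A =====
-- A's inner edge-loop body for one node: append e[1] if e[0] == node, then e[0] if e[1] == node.
-- e[0]/e[1] are pyGetD (Pre_ keeps every edge at length ≥ 2, where Python's e[0]/e[1] return).
def aInner (node : Int) (g : PySem.Dict Int (List Int)) (e : List Int) : PySem.Dict Int (List Int) :=
  let g1 := if PySem.List.pyGetD e 0 0 == node
            then g.modify node [] (fun l => l ++ [PySem.List.pyGetD e 1 0]) else g
  if PySem.List.pyGetD e 1 0 == node
  then g1.modify node [] (fun l => l ++ [PySem.List.pyGetD e 0 0]) else g1

-- A's outer loop body: graph[node] = [], then scan the whole edge list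
def aOuter (edges : List (List Int)) (graph : PySem.Dict Int (List Int)) (node : Int) :
    PySem.Dict Int (List Int) :=
  edges.foldl (aInner node) (graph.insert node [])

def constrGraph (edges : List (List Int)) (nodes : List Int) : List (Int × List Int) :=
  (nodes.foldl (aOuter edges) PySem.Dict.empty).items

-- ===== PORT B =====
-- B's edge-loop body: u, v = e[0], e[1]; append v to graph[u] if u is a key, then u to graph[v] if v is a key
def bStep (g : PySem.Dict Int (List Int)) (e : List Int) : PySem.Dict Int (List Int) :=
  let u := PySem.List.pyGetD e 0 0
  let v := PySem.List.pyGetD e 1 0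
  let g1 := if g.contains u then g.modify u [] (fun l => l ++ [v]) else g
  if g1.contains v then g1.modify v [] (fun l => l ++ [u]) else g1

def constrGraph_alt (edges : List (List Int)) (nodes : List Int) : List (Int × List Int) :=
  (edges.foldl bStep
    (nodes.foldl (fun g n => g.insert n ([] : List Int)) PySem.Dict.empty)).items

-- ===== PRECONDITION & SPEC =====
-- Pre_ excludes edge lists containing an edge with fewer than 2 entries: on those A raises
-- IndexError whenever nodes is nonempty, and its returning {} when nodes is empty is an accident
-- of A's loop nesting (the edges are never inspected); B's single edge pass raises there.
def Pre_constrGraph (edges : List (List Int)) (nodes : List Int) : Prop :=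
  ∀ e ∈ edges, 2 ≤ e.length
instance (edges : List (List Int)) (nodes : List Int) : Decidable (Pre_constrGraph edges nodes) := by unfold Pre_constrGraph; infer_instance
def pvWitness_constrGraph : List (List Int) × List Int := ([[1, 2], [2, 3], [2, 2]], [1, 2, 3])

def Spec_constrGraph (edges : List (List Int)) (nodes : List Int) (out : List (Int × List Int)) : Prop := out = constrGraph_alt edges nodes
instance (edges : List (List Int)) (nodes : List Int) (out : List (Int × List Int)) : Decidable (Spec_constrGraph edges nodes out) := by unfold Spec_constrGraph; infer_instance

-- ===== CLAIM (what is proved, stated in full; the proofs are below) =====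
def Claim_equal_constrGraph : Prop := ∀ (edges : List (List Int)) (nodes : List Int), Dom_constrGraph edges nodes → Pre_constrGraph edges nodes → Spec_constrGraph edges nodes (constrGraph edges nodes)

-- ===== LEMMAS AND PROOFS =====

-- the adjacency list of n: both endpoints of every incident edge, in edge order
def adj (n : Int) (edges : List (List Int)) : List Int :=
  edges.flatMap (fun e =>
    (if PySem.List.pyGetD e 0 0 == n then [PySem.List.pyGetD e 1 0] else []) ++
    (if PySem.List.pyGetD e 1 0 == n then [PySem.List.pyGetD e 0 0] else []))

theorem adj_cons (n : Int) (e : List Int) (es : List (List Int)) :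
    adj n (e :: es) =
      ((if PySem.List.pyGetD e 0 0 == n then [PySem.List.pyGetD e 1 0] else []) ++
       (if PySem.List.pyGetD e 1 0 == n then [PySem.List.pyGetD e 0 0] else [])) ++ adj n es := by
  simp [adj]

-- generic facts about the conditional-modify shape both loop bodies use
theorem modifyc_keys (g : PySem.Dict Int (List Int)) {x : Int} (f : List Int → List Int)
    (h : g.contains x = true) : (g.modify x [] f).keys = g.keys := by
  rw [PySem.Dict.keys_modify, PySem.Dict.keys_insert_of_contains _ _ h]

theorem contains_of_keys_eq {g g' : PySem.Dict Int (List Int)} (h : g.keys = g'.keys) (x : Int) :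
    g.contains x = g'.contains x := by
  rw [PySem.Dict.contains_eq_decide_mem_keys, PySem.Dict.contains_eq_decide_mem_keys, h]

theorem condModify_keys (g : PySem.Dict Int (List Int)) (x : Int) (f : List Int → List Int) :
    (if g.contains x then g.modify x [] f else g).keys = g.keys := by
  split_ifs with h
  · exact modifyc_keys g f h
  · rfl

theorem condModify_contains (g : PySem.Dict Int (List Int)) (x : Int) (f : List Int → List Int)
    (y : Int) : (if g.contains x then g.modify x [] f else g).contains y = g.contains y :=
  contains_of_keys_eq (condModify_keys g x f) y

theorem condModify_getD (g : PySem.Dict Int (List Int)) (x w k : Int) :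
    (if g.contains x then g.modify x [] (fun l => l ++ [w]) else g).getD k [] =
      g.getD k [] ++ (if g.contains k = true ∧ x = k then [w] else []) := by
  split_ifs with h h2 h2
  · rcases h2 with ⟨hk, hx⟩
    subst hx
    rw [PySem.Dict.getD_modify_self]
  · by_cases hx : k = x
    · subst hx; rw [PySem.Dict.getD_modify_self]
      exact absurd ⟨h, rfl⟩ h2
    · rw [PySem.Dict.getD_modify_of_ne _ _ _ hx, List.append_nil]
  · rcases h2 with ⟨hk, hx⟩; subst hx; exact absurd hk h
  · rw [List.append_nil]

-- ===== A-side characterisation =====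
theorem aInner_getD (n : Int) (g : PySem.Dict Int (List Int)) (e : List Int) (k : Int) :
    (aInner n g e).getD k [] =
      if k = n then
        g.getD n [] ++
          ((if PySem.List.pyGetD e 0 0 == n then [PySem.List.pyGetD e 1 0] else []) ++
           (if PySem.List.pyGetD e 1 0 == n then [PySem.List.pyGetD e 0 0] else []))
      else g.getD k [] := by
  unfold aInner
  by_cases hk : k = n <;>
    split_ifs <;>
      simp_all [PySem.Dict.getD_modify_self, PySem.Dict.getD_modify_of_ne]

theorem aFold_getD (es : List (List Int)) (n : Int) (g : PySem.Dict Int (List Int)) (k : Int) :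
    (es.foldl (aInner n) g).getD k [] =
      if k = n then g.getD n [] ++ adj n es else g.getD k [] := by
  induction es generalizing g with
  | nil => by_cases hk : k = n <;> simp [adj, hk]
  | cons e es ih =>
    simp only [List.foldl_cons, ih, aInner_getD, adj_cons]
    by_cases hk : k = n <;> simp [hk]

theorem aInner_keys (n : Int) (g : PySem.Dict Int (List Int)) (e : List Int)
    (h : g.contains n = true) : (aInner n g e).keys = g.keys := by
  unfold aInner
  split_ifs with h1 h2 h2
  · rw [modifyc_keys _ _ (by rw [PySem.Dict.contains_modify]; simp [h]), modifyc_keys _ _ h]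
  · rw [modifyc_keys _ _ h]
  · rw [modifyc_keys _ _ h]
  · rfl

theorem aInner_contains (n : Int) (g : PySem.Dict Int (List Int)) (e : List Int)
    (h : g.contains n = true) : (aInner n g e).contains n = true := by
  rw [contains_of_keys_eq (aInner_keys n g e h)]; exact h

theorem aFold_keys (es : List (List Int)) (n : Int) (g : PySem.Dict Int (List Int))
    (h : g.contains n = true) : (es.foldl (aInner n) g).keys = g.keys := by
  induction es generalizing g with
  | nil => rfl
  | cons e es ih => rw [List.foldl_cons, ih _ (aInner_contains n g e h), aInner_keys n g e h]

theorem aOuter_keys (edges : List (List Int)) (g : PySem.Dict Int (List Int)) (n : Int) :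
    (aOuter edges g n).keys = (g.insert n ([] : List Int)).keys :=
  aFold_keys edges n _ (PySem.Dict.contains_insert_self g n [])

-- key-equality propagates through the plain insert fold
theorem insertFold_keys_congr (ns : List Int) (g g' : PySem.Dict Int (List Int))
    (h : g.keys = g'.keys) :
    (ns.foldl (fun d n => d.insert n ([] : List Int)) g).keys =
      (ns.foldl (fun d n => d.insert n ([] : List Int)) g').keys := by
  induction ns generalizing g g' with
  | nil => exact h
  | cons n ns ih =>
    refine ih _ _ ?_
    by_cases hc : g.contains n = true
    · rw [PySem.Dict.keys_insert_of_contains _ _ hc,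
        PySem.Dict.keys_insert_of_contains _ _ (by rw [← contains_of_keys_eq h]; exact hc), h]
    · rw [PySem.Dict.keys_insert_of_not_contains _ _ (by simpa using hc),
        PySem.Dict.keys_insert_of_not_contains _ _
          (by rw [← contains_of_keys_eq h]; simpa using hc), h]

theorem aMain_keys (edges : List (List Int)) (nodes : List Int) (g : PySem.Dict Int (List Int)) :
    (nodes.foldl (aOuter edges) g).keys =
      (nodes.foldl (fun d n => d.insert n ([] : List Int)) g).keys := by
  induction nodes generalizing g with
  | nil => rfl
  | cons n ns ih =>
    simp only [List.foldl_cons]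
    rw [ih]
    exact insertFold_keys_congr ns _ _ (aOuter_keys edges g n)

theorem aMain_getD (edges : List (List Int)) (nodes : List Int) (g : PySem.Dict Int (List Int))
    (k : Int) :
    (nodes.foldl (aOuter edges) g).getD k [] =
      if k ∈ nodes then adj k edges else g.getD k [] := by
  induction nodes generalizing g with
  | nil => simp
  | cons n ns ih =>
    simp only [List.foldl_cons, ih]
    have hstep : (aOuter edges g n).getD k [] = if k = n then adj n edges else g.getD k [] := by
      unfold aOuter
      rw [aFold_getD]
      by_cases hk : k = n <;> simp [hk, PySem.Dict.getD_insert]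
    by_cases hin : k ∈ ns <;> by_cases hk : k = n <;> simp_all [List.mem_cons]

-- ===== B-side characterisation =====
theorem bStep_keys (g : PySem.Dict Int (List Int)) (e : List Int) :
    (bStep g e).keys = g.keys := by
  simp only [bStep]
  rw [condModify_keys, condModify_keys]

theorem bStep_contains (g : PySem.Dict Int (List Int)) (e : List Int) (k : Int) :
    (bStep g e).contains k = g.contains k := by
  simp only [bStep]
  rw [condModify_contains, condModify_contains]

theorem bStep_getD (g : PySem.Dict Int (List Int)) (e : List Int) (k : Int) :
    (bStep g e).getD k [] =
      g.getD k [] ++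
        (if g.contains k then
          (if PySem.List.pyGetD e 0 0 == k then [PySem.List.pyGetD e 1 0] else []) ++
          (if PySem.List.pyGetD e 1 0 == k then [PySem.List.pyGetD e 0 0] else [])
         else []) := by
  simp only [bStep]
  rw [condModify_getD, condModify_getD, condModify_contains]
  by_cases hk : g.contains k = true <;>
    by_cases h1 : PySem.List.pyGetD e 0 0 = k <;>
      by_cases h2 : PySem.List.pyGetD e 1 0 = k <;>
        simp [hk, h1, h2]

theorem bFold_getD (es : List (List Int)) (g : PySem.Dict Int (List Int)) (k : Int) :
    (es.foldl bStep g).getD k [] =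
      g.getD k [] ++ (if g.contains k then adj k es else []) := by
  induction es generalizing g with
  | nil => simp [adj]
  | cons e es ih =>
    simp only [List.foldl_cons, ih, bStep_getD, bStep_contains, adj_cons]
    by_cases h : g.contains k = true <;> simp [h]

theorem bFold_keys (es : List (List Int)) (g : PySem.Dict Int (List Int)) :
    (es.foldl bStep g).keys = g.keys := by
  induction es generalizing g with
  | nil => rfl
  | cons e es ih => rw [List.foldl_cons, ih, bStep_keys]

-- ===== the shared initial dict =====
theorem init_getD (nodes : List Int) (g : PySem.Dict Int (List Int)) (k : Int) :
    ((nodes.foldl (fun g n => g.insert n ([] : List Int)) g).getD k []) =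
      (if k ∈ nodes then [] else g.getD k []) := by
  induction nodes generalizing g with
  | nil => simp
  | cons n ns ih =>
    simp only [List.foldl_cons, ih, PySem.Dict.getD_insert]
    by_cases hin : k ∈ ns <;> by_cases hk : k = n <;> simp_all [List.mem_cons]

theorem init_contains (nodes : List Int) (g : PySem.Dict Int (List Int)) (k : Int) :
    ((nodes.foldl (fun g n => g.insert n ([] : List Int)) g).contains k) =
      (decide (k ∈ nodes) || g.contains k) := by
  induction nodes generalizing g with
  | nil => simp
  | cons n ns ih =>
    simp only [List.foldl_cons, ih, PySem.Dict.contains_insert]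
    by_cases hin : k ∈ ns <;> by_cases hk : k = n <;> simp_all [List.mem_cons]

-- ===== VERDICT (by name: the statement is the Claim_ definition above) =====
theorem constrGraph_spec : Claim_equal_constrGraph := by
  intro edges nodes _ _
  unfold Spec_constrGraph constrGraph constrGraph_alt
  set g0 : PySem.Dict Int (List Int) :=
    nodes.foldl (fun g n => g.insert n ([] : List Int)) PySem.Dict.empty with hg0
  have hnodup0 : g0.keys.Nodup :=
    PySem.Dict.nodup_keys_foldl_insert nodes (fun _ _ => ([] : List Int)) PySem.Dict.empty
      (by simp)
  have hAkeys : (nodes.foldl (aOuter edges) PySem.Dict.empty).keys = g0.keys :=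
    aMain_keys edges nodes PySem.Dict.empty
  have hBkeys : (edges.foldl bStep g0).keys = g0.keys := bFold_keys edges g0
  rw [PySem.Dict.items_eq_map_keys _ (hAkeys ▸ hnodup0) ([] : List Int),
    PySem.Dict.items_eq_map_keys _ (hBkeys ▸ hnodup0) ([] : List Int), hAkeys, hBkeys]
  refine List.map_congr_left ?_
  intro k hk
  have hmem : k ∈ nodes := by
    have := init_contains nodes PySem.Dict.empty k
    rw [PySem.Dict.contains_eq_decide_mem_keys, ← hg0] at this
    simpa [hk] using this.symm
  have hA : (nodes.foldl (aOuter edges) PySem.Dict.empty).getD k [] = adj k edges := by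
    rw [aMain_getD]; simp [hmem]
  have hB : (edges.foldl bStep g0).getD k [] = adj k edges := by
    rw [bFold_getD, init_getD, init_contains]
    simp [hmem]
  rw [hA, hB]
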